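-- pv_equiv track=rewrite | github.com/MinaPecheux/Advent-Of-Code | 2018/Python/day12.py | padding_buffers
-- ===== SOURCE A (Python) =====
-- def padding_buffers(rules):
--     '''Computes the padding size that should be added to the state each
--     generation to prepare the next one.
--
--     :param rules: Evolution rules for the pots (i.e. patterns that impact
--         whether or not their is a plant in the pot).
--     :type rules: dict
--     '''
--     buffers = [ 0, 0 ]
--     for rule, replacement in rules.items():
--         if replacement == '#':
--             l = len(rule)
--             for i in range(l):
--                 if rule[i] == '#': break
--                 buffers[0] = max([ buffers[0], i+1 ])
--             for i in range(l - 1, -1, -1):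
--                 if rule[i] == '#': break
--                 buffers[1] = max([ buffers[1], l - i ])
--     return buffers
-- ===== SOURCE B (Python) =====
-- def padding_buffers(rules):
--     '''Computes the padding size that should be added to the state each
--     generation to prepare the next one.
--
--     :param rules: Evolution rules for the pots.
--     :type rules: dict
--     '''
--     left = right = 0
--     for rule, replacement in rules.items():
--         if replacement == '#':
--             hs = [i for i, c in enumerate(rule) if c == '#']
--             n = len(rule)
--             left = max(left, min(hs) if hs else n)
--             right = max(right, n - 1 - max(hs) if hs else n)
--     return [left, right]
-- ===== Notes on version B (the rewrite author's own statement) =====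
-- stated objective: simpler
-- what changed: Instead of A's two directional index scans with break-on-'#' and an in-loop running max, B builds the list of '#' positions of each relevant rule once (an enumerate comprehension) and derives the left padding from its min and the right padding from its max (falling back to the rule length when it is empty), folding both into the two maxima.
import Mathlib
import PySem

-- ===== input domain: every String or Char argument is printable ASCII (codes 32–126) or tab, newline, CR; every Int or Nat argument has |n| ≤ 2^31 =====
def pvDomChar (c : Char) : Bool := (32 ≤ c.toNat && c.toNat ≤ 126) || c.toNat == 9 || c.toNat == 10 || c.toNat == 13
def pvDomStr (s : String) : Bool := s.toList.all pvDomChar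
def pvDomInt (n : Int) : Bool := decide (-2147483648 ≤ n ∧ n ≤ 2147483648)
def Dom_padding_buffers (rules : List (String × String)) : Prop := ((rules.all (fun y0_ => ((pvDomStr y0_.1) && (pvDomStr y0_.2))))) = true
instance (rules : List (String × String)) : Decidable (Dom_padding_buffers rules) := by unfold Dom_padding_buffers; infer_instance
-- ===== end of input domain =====

-- B builds, per relevant rule, the list of '#' positions once and derives both paddings from its
-- min and max, instead of A's two directional break-scans; same cost, simpler decomposition.

-- ===== PORT A =====
-- for i in range(l): if rule[i] == '#': break; buffers[0] = max([buffers[0], i+1])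
def pbScanFwd (rule : String) (idxs : List Int) (b : Int) : Int :=
  match idxs with
  | [] => b
  | i :: rest =>
    if PySem.Str.pyGet? rule i = some '#' then b
    else pbScanFwd rule rest (max b (i + 1))

-- for i in range(l-1, -1, -1): if rule[i] == '#': break; buffers[1] = max([buffers[1], l-i])
def pbScanBwd (rule : String) (l : Int) (idxs : List Int) (b : Int) : Int :=
  match idxs with
  | [] => b
  | i :: rest =>
    if PySem.Str.pyGet? rule i = some '#' then b
    else pbScanBwd rule l rest (max b (l - i))

def pbStepA (bufs : Int × Int) (p : String × String) : Int × Int :=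
  if p.2 = "#" then
    let l : Int := PySem.Str.len p.1
    (pbScanFwd p.1 (PySem.List.pyRange 0 l 1) bufs.1,
     pbScanBwd p.1 l (PySem.List.pyRange (l - 1) (-1) (-1)) bufs.2)
  else bufs

def padding_buffers (rules : List (String × String)) : List Int :=
  let bufs := ((PySem.Dict.ofList rules).items).foldl pbStepA (0, 0)
  [bufs.1, bufs.2]

-- ===== PORT B =====
def pbStepB (lr : Int × Int) (p : String × String) : Int × Int :=
  if p.2 = "#" then
    -- hs = [i for i, c in enumerate(rule) if c == '#']
    let hs : List Int := ((PySem.List.enumerate p.1.toList 0).filter (fun ic => ic.2 == '#')).map (fun ic => ic.1)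
    let n : Int := PySem.Str.len p.1
    -- min(hs) if hs else n  (min? is none exactly on the empty list)
    let left := max lr.1 ((PySem.List.min? hs (fun x => x)).getD n)
    -- n - 1 - max(hs) if hs else n
    let right := max lr.2 (match PySem.List.max? hs (fun x => x) with
      | some m => n - 1 - m
      | none => n)
    (left, right)
  else lr

def padding_buffers_alt (rules : List (String × String)) : List Int :=
  let lr := ((PySem.Dict.ofList rules).items).foldl pbStepB (0, 0)
  [lr.1, lr.2]

-- ===== PRECONDITION & SPEC =====
def Spec_padding_buffers (rules : List (String × String)) (out : List Int) : Prop := out = padding_buffers_alt rules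
instance (rules : List (String × String)) (out : List Int) : Decidable (Spec_padding_buffers rules out) := by unfold Spec_padding_buffers; infer_instance

-- ===== CLAIM (what is proved, stated in full; the proofs are below) =====
def Claim_equal_padding_buffers : Prop := ∀ (rules : List (String × String)), Dom_padding_buffers rules → Spec_padding_buffers rules (padding_buffers rules)

-- ===== LEMMAS AND PROOFS =====

-- length of the longest '#'-free prefix (index of the first '#', or the length)
def pbLead (cs : List Char) : Nat :=
  match cs with
  | [] => 0
  | c :: t => if c = '#' then 0 else pbLead t + 1

theorem pbLead_eq_length_of_not_mem (cs : List Char) (h : '#' ∉ cs) : pbLead cs = cs.length := by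
  induction cs with
  | nil => rfl
  | cons c t ih =>
    simp only [List.mem_cons, not_or] at h
    have hc : c ≠ '#' := fun hc => h.1 hc.symm
    simp [pbLead, hc, ih h.2]

theorem pbLead_le_of_hash (cs : List Char) (j : Nat) (h : cs[j]? = some '#') : pbLead cs ≤ j := by
  induction cs generalizing j with
  | nil => simp at h
  | cons c t ih =>
    by_cases hc : c = '#'
    · simp [pbLead, hc]
    · cases j with
      | zero => simp [hc] at h
      | succ j =>
        simp only [List.getElem?_cons_succ] at h
        simp only [pbLead, hc, if_false]
        have := ih j h
        omega

theorem pbLead_lt_of_mem (cs : List Char) (h : '#' ∈ cs) : pbLead cs < cs.length := by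
  obtain ⟨j, hj, hget⟩ := List.mem_iff_getElem.mp h
  have : pbLead cs ≤ j := pbLead_le_of_hash cs j (by simp [List.getElem?_eq_getElem hj, hget])
  omega

theorem pbLead_append_of_mem (xs ys : List Char) (h : '#' ∈ xs) :
    pbLead (xs ++ ys) = pbLead xs := by
  induction xs with
  | nil => simp at h
  | cons c t ih =>
    by_cases hc : c = '#'
    · simp [pbLead, hc]
    · simp only [List.mem_cons] at h
      rcases h with h | h
      · exact absurd h.symm hc
      · simp [pbLead, hc, ih h]

theorem pbLead_append_hash (xs ys : List Char) (h : '#' ∉ xs) :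
    pbLead (xs ++ '#' :: ys) = xs.length := by
  induction xs with
  | nil => simp [pbLead]
  | cons c t ih =>
    simp only [List.mem_cons, not_or] at h
    have hc : c ≠ '#' := fun hc => h.1 hc.symm
    simp [pbLead, hc, ih h.2]

-- the list of '#' positions, as the B port builds it
def pbHs (s : Int) (cs : List Char) : List Int :=
  ((PySem.List.enumerate cs s).filter (fun ic => ic.2 == '#')).map (fun ic => ic.1)

theorem pbHs_nil (s : Int) : pbHs s [] = [] := by
  simp [pbHs, PySem.List.enumerate]

theorem pbHs_cons (s : Int) (c : Char) (t : List Char) :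
    pbHs s (c :: t) = if c = '#' then s :: pbHs (s + 1) t else pbHs (s + 1) t := by
  by_cases hc : c = '#' <;>
    simp [pbHs, PySem.List.enumerate_cons, hc]

theorem pbHs_mem_ge (cs : List Char) (s : Int) : ∀ x ∈ pbHs s cs, s ≤ x := by
  induction cs generalizing s with
  | nil => simp [pbHs_nil]
  | cons c t ih =>
    intro x hx
    rw [pbHs_cons] at hx
    by_cases hc : c = '#'
    · rw [if_pos hc] at hx
      rcases List.mem_cons.mp hx with h | h
      · omega
      · have := ih (s + 1) x h; omega
    · rw [if_neg hc] at hx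
      have := ih (s + 1) x hx; omega

theorem pbHs_eq_nil_iff (cs : List Char) (s : Int) : pbHs s cs = [] ↔ '#' ∉ cs := by
  induction cs generalizing s with
  | nil => simp [pbHs_nil]
  | cons c t ih =>
    rw [pbHs_cons]
    by_cases hc : c = '#'
    · simp [hc]
    · rw [if_neg hc, ih (s + 1)]
      simp only [List.mem_cons, not_or]
      constructor
      · intro h; exact ⟨fun he => hc he.symm, h⟩
      · intro h; exact h.2

theorem foldl_min_of_ge (l : List Int) (b : Int) (h : ∀ x ∈ l, b ≤ x) :
    l.foldl min b = b := by
  induction l with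
  | nil => rfl
  | cons x t ih =>
    have hb : min b x = b := min_eq_left (h x (by simp))
    simp only [List.foldl_cons, hb]
    exact ih (fun y hy => h y (by simp [hy]))

theorem foldl_max_comm (l : List Int) (b c : Int) :
    l.foldl max (max b c) = max b (l.foldl max c) := by
  induction l generalizing c with
  | nil => rfl
  | cons x t ih =>
    simp only [List.foldl_cons, max_assoc]
    exact ih (max c x)

theorem pbHs_min (cs : List Char) (s : Int) (h : '#' ∈ cs) :
    PySem.List.min? (pbHs s cs) (fun x => x) = some (s + (pbLead cs : Int)) := by
  induction cs generalizing s with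
  | nil => simp at h
  | cons c t ih =>
    rw [pbHs_cons]
    by_cases hc : c = '#'
    · rw [if_pos hc, PySem.List.min?_id_cons]
      have := foldl_min_of_ge (pbHs (s + 1) t) s
        (fun x hx => by have := pbHs_mem_ge t (s + 1) x hx; omega)
      rw [this]
      simp [pbLead, hc]
    · rw [if_neg hc]
      have hmem : '#' ∈ t := by
        rcases List.mem_cons.mp h with h' | h'
        · exact absurd h'.symm hc
        · exact h'
      rw [ih (s + 1) hmem]
      simp only [pbLead, hc, if_false]
      congr 1
      push_cast
      ring

theorem pbHs_max (cs : List Char) (s : Int) (h : '#' ∈ cs) :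
    PySem.List.max? (pbHs s cs) (fun x => x)
      = some (s + (cs.length : Int) - 1 - (pbLead cs.reverse : Int)) := by
  induction cs generalizing s with
  | nil => simp at h
  | cons c t ih =>
    rw [pbHs_cons]
    by_cases hmt : '#' ∈ t
    · have hrev : pbLead (c :: t).reverse = pbLead t.reverse := by
        rw [List.reverse_cons]
        exact pbLead_append_of_mem _ _ (by simpa using hmt)
      by_cases hc : c = '#'
      · rw [if_pos hc]
        have hrest := ih (s + 1) hmt
        obtain ⟨r, rs, hr⟩ : ∃ r rs, pbHs (s + 1) t = r :: rs := by
          cases hx : pbHs (s + 1) t with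
          | nil => exact absurd ((pbHs_eq_nil_iff t (s + 1)).mp hx) (by simpa using hmt)
          | cons r rs => exact ⟨r, rs, rfl⟩
        rw [hr] at hrest ⊢
        rw [PySem.List.max?_id_cons] at hrest ⊢
        have hM := Option.some.inj hrest
        simp only [List.foldl_cons]
        have hcomm := foldl_max_comm rs s r
        have hsM : s ≤ rs.foldl max r := by
          have hlt := pbLead_lt_of_mem t.reverse (by simpa using hmt)
          simp only [List.length_reverse] at hlt
          omega
        rw [hcomm, max_eq_right hsM, hM, hrev]
        congr 1
        push_cast [List.length_cons]
        ring
      · rw [if_neg hc]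
        rw [ih (s + 1) hmt, hrev]
        congr 1
        push_cast [List.length_cons]
        ring
    · have hc : c = '#' := by
        rcases List.mem_cons.mp h with h' | h'
        · exact h'.symm
        · exact absurd h' hmt
      rw [if_pos hc]
      rw [(pbHs_eq_nil_iff t (s + 1)).mpr hmt]
      rw [PySem.List.max?_id_cons]
      have hrev : pbLead (c :: t).reverse = t.length := by
        rw [List.reverse_cons, hc]
        have := pbLead_append_hash t.reverse [] (by simpa using hmt)
        simpa using this
      rw [hrev]
      simp only [List.foldl_nil]
      congr 1
      push_cast [List.length_cons]
      ring

theorem scanFwd_eq (s : String) :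
    ∀ (n k : Nat) (b : Int), s.toList.length - k = n → k ≤ s.toList.length → (k : Int) ≤ b →
    pbScanFwd s (PySem.List.pyRange (k : Int) (s.toList.length : Int) 1) b
      = max b ((k : Int) + ((pbLead (s.toList.drop k) : Nat) : Int)) := by
  intro n
  induction n with
  | zero =>
    intro k b hn hk hb
    have hk' : k = s.toList.length := by omega
    subst hk'
    rw [PySem.List.pyRange_one_eq_nil (by omega)]
    simp only [pbScanFwd, List.drop_length, pbLead]
    omega
  | succ n ih =>
    intro k b hn hk hb
    have hklt : k < s.toList.length := by omega
    rw [PySem.List.pyRange_one_cons (by exact_mod_cast hklt)]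
    have hget : PySem.Str.pyGet? s (k : Int) = s.toList[k]? := by
      rw [PySem.Str.pyGet?_natCast]
    have hdrop : s.toList.drop k = s.toList[k] :: s.toList.drop (k + 1) :=
      List.drop_eq_getElem_cons hklt
    by_cases hc : s.toList[k] = '#'
    · simp only [pbScanFwd, hget, List.getElem?_eq_getElem hklt, hc]
      rw [hdrop, hc]
      simp [pbLead]
      omega
    · have hne : ¬ (s.toList[k]? = some '#') := by
        simp [List.getElem?_eq_getElem hklt, hc]
      simp only [pbScanFwd, hget, hne, if_false]
      have hcast : (k : Int) + 1 = ((k + 1 : Nat) : Int) := by push_cast; ring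
      rw [hcast]
      rw [ih (k + 1) (max b ((k + 1 : Nat) : Int)) (by omega) (by omega) (le_max_right _ _)]
      rw [hdrop]
      simp only [pbLead, hc, if_false]
      rw [max_assoc]
      congr 1
      push_cast
      omega

theorem scanBwd_eq (s : String) :
    ∀ (m : Nat) (b : Int), m < s.toList.length →
    ((s.toList.length : Int) - 1 - m) ≤ b →
    pbScanBwd s (s.toList.length : Int) (PySem.List.pyRange (m : Int) (-1) (-1)) b
      = max b ((s.toList.length : Int) - 1 - m + ((pbLead ((s.toList.take (m + 1)).reverse) : Nat) : Int)) := by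
  intro m
  induction m with
  | zero =>
    intro b hm hb
    rw [PySem.List.pyRange_neg_one_cons (by omega)]
    have hget : PySem.Str.pyGet? s ((0 : Nat) : Int) = s.toList[0]? := by
      rw [PySem.Str.pyGet?_natCast]
    have htake : s.toList.take 1 = [s.toList[0]] := by
      rw [List.take_one]
      simp [List.head?_eq_getElem?, List.getElem?_eq_getElem hm]
    by_cases hc : s.toList[0] = '#'
    · simp only [Int.natCast_zero] at hget ⊢
      simp only [pbScanBwd, hget, List.getElem?_eq_getElem hm, hc]
      rw [htake, hc, List.reverse_singleton, show pbLead ['#'] = 0 from rfl]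
      have hlen' : s.toList.length = s.length := String.length_toList
      push_cast
      omega
    · have hne : ¬ (s.toList[0]? = some '#') := by
        simp [List.getElem?_eq_getElem hm, hc]
      simp only [Int.natCast_zero] at hget ⊢
      simp only [pbScanBwd, hget, hne, if_false]
      rw [show ((0 : Int) - 1) = -1 by ring, PySem.List.pyRange_neg_one_eq_nil (le_refl _)]
      simp only [pbScanBwd]
      rw [htake, List.reverse_singleton]
      simp only [pbLead, hc, if_false]
      have hlen' : s.toList.length = s.length := String.length_toList
      push_cast
      omega
  | succ m ih =>
    intro b hm hb
    rw [PySem.List.pyRange_neg_one_cons (by omega)]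
    have hget : PySem.Str.pyGet? s ((m + 1 : Nat) : Int) = s.toList[m + 1]? := by
      rw [PySem.Str.pyGet?_natCast]
    have htake : s.toList.take (m + 2) = s.toList.take (m + 1) ++ [s.toList[m + 1]] :=
      List.take_succ_eq_append_getElem hm
    have hrev : (s.toList.take (m + 2)).reverse
        = s.toList[m + 1] :: (s.toList.take (m + 1)).reverse := by
      rw [htake]; simp
    by_cases hc : s.toList[m + 1] = '#'
    · simp only [pbScanBwd, hget, List.getElem?_eq_getElem hm, hc]
      rw [hrev, hc]
      simp only [pbLead]
      have hlen' : s.toList.length = s.length := String.length_toList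
      push_cast
      omega
    · have hne : ¬ (s.toList[m + 1]? = some '#') := by
        simp [List.getElem?_eq_getElem hm, hc]
      simp only [pbScanBwd, hget, hne, if_false]
      have hcast : ((m + 1 : Nat) : Int) - 1 = ((m : Nat) : Int) := by push_cast; ring
      rw [hcast]
      rw [ih (max b ((s.toList.length : Int) - ((m + 1 : Nat) : Int)))
        (by omega)
        (by have := le_max_right b ((s.toList.length : Int) - ((m + 1 : Nat) : Int)); push_cast at this ⊢; omega)]
      rw [hrev]
      simp only [pbLead, hc, if_false]
      rw [max_assoc]
      congr 1
      have hlen' : s.toList.length = s.length := String.length_toList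
      push_cast
      omega

theorem scanFwd_ge (s : String) (idxs : List Int) (b : Int) : b ≤ pbScanFwd s idxs b := by
  induction idxs generalizing b with
  | nil => simp [pbScanFwd]
  | cons i rest ih =>
    simp only [pbScanFwd]
    split
    · exact le_refl b
    · exact le_trans (le_max_left _ _) (ih _)

theorem scanBwd_ge (s : String) (l : Int) (idxs : List Int) (b : Int) : b ≤ pbScanBwd s l idxs b := by
  induction idxs generalizing b with
  | nil => simp [pbScanBwd]
  | cons i rest ih =>
    simp only [pbScanBwd]
    split
    · exact le_refl b
    · exact le_trans (le_max_left _ _) (ih _)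

theorem stepA_nonneg (lr : Int × Int) (p : String × String) (h1 : 0 ≤ lr.1) (h2 : 0 ≤ lr.2) :
    0 ≤ (pbStepA lr p).1 ∧ 0 ≤ (pbStepA lr p).2 := by
  unfold pbStepA
  split
  · exact ⟨le_trans h1 (scanFwd_ge _ _ _), le_trans h2 (scanBwd_ge _ _ _ _)⟩
  · exact ⟨h1, h2⟩

set_option maxHeartbeats 1000000 in
theorem step_eq (lr : Int × Int) (p : String × String) (h1 : 0 ≤ lr.1) (h2 : 0 ≤ lr.2) :
    pbStepA lr p = pbStepB lr p := by
  simp only [pbStepA, pbStepB]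
  by_cases hp : p.2 = "#"
  · rw [if_pos hp, if_pos hp]
    have hlen : PySem.Str.len p.1 = (p.1.toList.length : Int) := by
      simp [String.length_toList]
    have hhs : ((PySem.List.enumerate p.1.toList 0).filter (fun ic => ic.2 == '#')).map (fun ic => ic.1)
        = pbHs 0 p.1.toList := rfl
    rw [Prod.mk.injEq]
    constructor
    -- left component
    · rw [hlen, hhs]
      have hsf := scanFwd_eq p.1 p.1.toList.length 0 lr.1 (by omega) (by omega) h1
      rw [show ((0 : Nat) : Int) = (0 : Int) from rfl] at hsf
      rw [hsf]
      simp only [List.drop_zero, zero_add]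
      by_cases hmem : '#' ∈ p.1.toList
      · rw [pbHs_min _ _ hmem]
        simp
      · rw [(pbHs_eq_nil_iff _ _).mpr hmem]
        have hl : pbLead p.1.toList = p.1.toList.length := pbLead_eq_length_of_not_mem _ hmem
        simp [PySem.List.min?, hl]
    -- right component
    · rw [hlen, hhs]
      rcases Nat.eq_zero_or_pos p.1.toList.length with hz | hpos
      · have hnil : p.1.toList = [] := List.eq_nil_of_length_eq_zero hz
        rw [hnil]
        simp only [List.length_nil, Int.natCast_zero, show ((0 : Int) - 1) = -1 from by ring]
        rw [PySem.List.pyRange_neg_one_eq_nil (le_refl _)]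
        simp only [pbScanBwd, pbHs_nil, PySem.List.max?, List.foldl_nil]
        omega
      · have hcast : (p.1.toList.length : Int) - 1 = ((p.1.toList.length - 1 : Nat) : Int) := by
          omega
        rw [hcast]
        have hsb := scanBwd_eq p.1 (p.1.toList.length - 1) lr.2 (by omega) (by omega)
        rw [hsb]
        have htk : p.1.toList.length - 1 + 1 = p.1.toList.length := by omega
        rw [htk, List.take_length]
        by_cases hmem : '#' ∈ p.1.toList
        · rw [pbHs_max _ _ hmem]
          simp only [zero_add]
          congr 1
          omega
        · rw [(pbHs_eq_nil_iff _ _).mpr hmem]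
          have hmem' : '#' ∉ p.1.toList.reverse := by simpa using hmem
          have hlr : pbLead p.1.toList.reverse = p.1.toList.length :=
            (pbLead_eq_length_of_not_mem _ hmem').trans (by simp)
          simp only [PySem.List.max?, List.foldl_nil]
          congr 1
          omega
  · rw [if_neg hp, if_neg hp]

theorem fold_eq : ∀ (l : List (String × String)) (lr : Int × Int), 0 ≤ lr.1 → 0 ≤ lr.2 →
    l.foldl pbStepA lr = l.foldl pbStepB lr := by
  intro l
  induction l with
  | nil => intros; rfl
  | cons p t ih =>
    intro lr h1 h2
    simp only [List.foldl_cons]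
    rw [← step_eq lr p h1 h2]
    obtain ⟨g1, g2⟩ := stepA_nonneg lr p h1 h2
    exact ih _ g1 g2

-- ===== VERDICT (by name: the statement is the Claim_ definition above) =====
theorem padding_buffers_spec : Claim_equal_padding_buffers := by
  intro rules _
  unfold Spec_padding_buffers padding_buffers padding_buffers_alt
  rw [fold_eq _ (0, 0) (le_refl 0) (le_refl 0)]
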